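-- pv_equiv track=rewrite | github.com/XAI-liacs/LLaMEA | llamea/utils.py | _leading_trailing_context_mask
-- ===== SOURCE A (Python) =====
-- from typing import List, Tuple
--
-- def _leading_trailing_context_mask(
--     old_pairs: List[Tuple[str, bool]]
-- ) -> Tuple[int, int]:
--     """Return counts of leading and trailing context-only lines in old_pairs."""
--     lead = 0
--     for t, required in old_pairs:
--         if required:
--             break
--         lead += 1
--     trail = 0
--     for t, required in reversed(old_pairs):
--         if required:
--             break
--         trail += 1
--     return lead, trail
-- ===== SOURCE B (Python) =====
-- from typing import List, Tuple
--
-- def _leading_trailing_context_mask(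
--     old_pairs: List[Tuple[str, bool]]
-- ) -> Tuple[int, int]:
--     """Return counts of leading and trailing context-only lines in old_pairs."""
--     n = len(old_pairs)
--     first_req = -1
--     last_req = -1
--     for i, (_t, required) in enumerate(old_pairs):
--         if required:
--             if first_req < 0:
--                 first_req = i
--             last_req = i
--     if first_req < 0:
--         return n, n
--     return first_req, n - 1 - last_req
-- ===== Notes on version B (the rewrite author's own statement) =====
-- stated objective: alternative
-- what changed: Replaces A's two break-terminated scans (forward and over reversed(old_pairs)) by ONE full enumerate pass recording the first and last required indices, then computes both counts arithmetically (n,n if no required line).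
import Mathlib
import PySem

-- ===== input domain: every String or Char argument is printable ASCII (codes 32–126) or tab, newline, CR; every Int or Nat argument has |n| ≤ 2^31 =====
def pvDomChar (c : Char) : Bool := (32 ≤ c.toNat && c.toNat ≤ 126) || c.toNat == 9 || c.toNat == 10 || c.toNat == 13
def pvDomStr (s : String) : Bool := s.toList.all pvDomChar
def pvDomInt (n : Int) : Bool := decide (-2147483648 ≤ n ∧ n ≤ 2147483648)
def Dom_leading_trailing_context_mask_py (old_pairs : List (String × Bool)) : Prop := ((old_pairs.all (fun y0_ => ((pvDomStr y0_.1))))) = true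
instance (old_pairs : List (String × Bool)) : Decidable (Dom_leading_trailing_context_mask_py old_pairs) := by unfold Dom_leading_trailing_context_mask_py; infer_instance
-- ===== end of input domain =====

-- B replaces A's two break-terminated scans by one full indexed pass recording the
-- first/last required indices and deriving both counts arithmetically (objective: alternative).


-- ===== PORT A =====
-- A's first loop: count until the first required line (break).
def pvLeadA : List (String × Bool) → Int
  | [] => 0
  | p :: rest => if p.2 then 0 else 1 + pvLeadA rest

def leading_trailing_context_mask_py (old_pairs : List (String × Bool)) : Int × Int :=
  -- second loop runs the same break-terminated count over reversed(old_pairs)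
  (pvLeadA old_pairs, pvLeadA old_pairs.reverse)

-- ===== PORT B =====
-- the body of B's single enumerate loop
def pvStepB (st : Int × Int) (p : Int × (String × Bool)) : Int × Int :=
  if p.2.2 then ((if st.1 < 0 then p.1 else st.1), p.1) else st

def leading_trailing_context_mask_py_alt (old_pairs : List (String × Bool)) : Int × Int :=
  let n : Int := old_pairs.length
  let st := (PySem.List.enumerate old_pairs).foldl pvStepB (-1, -1)
  if st.1 < 0 then (n, n) else (st.1, n - 1 - st.2)

-- ===== PRECONDITION & SPEC =====
def Spec_leading_trailing_context_mask_py (old_pairs : List (String × Bool)) (out : Int × Int) : Prop := out = leading_trailing_context_mask_py_alt old_pairs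
instance (old_pairs : List (String × Bool)) (out : Int × Int) : Decidable (Spec_leading_trailing_context_mask_py old_pairs out) := by unfold Spec_leading_trailing_context_mask_py; infer_instance

-- ===== CLAIM (what is proved, stated in full; the proofs are below) =====
def Claim_equal_leading_trailing_context_mask_py : Prop := ∀ (old_pairs : List (String × Bool)), Dom_leading_trailing_context_mask_py old_pairs → Spec_leading_trailing_context_mask_py old_pairs (leading_trailing_context_mask_py old_pairs)

-- ===== LEMMAS AND PROOFS =====

-- index of the first (resp. last) required line, proof-side characterisations
def pvFirstT : List (String × Bool) → Option Nat
  | [] => none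
  | p :: rest => if p.2 then some 0 else (pvFirstT rest).map (· + 1)

def pvLastT : List (String × Bool) → Option Nat
  | [] => none
  | p :: rest =>
    match pvLastT rest with
    | some k => some (k + 1)
    | none => if p.2 then some 0 else none

theorem pvLastT_append_single (l : List (String × Bool)) (p : String × Bool) :
    pvLastT (l ++ [p]) = if p.2 then some l.length else pvLastT l := by
  induction l with
  | nil => by_cases hp : p.2 <;> simp [pvLastT, hp]
  | cons q r ih =>
    simp only [List.cons_append, pvLastT, ih]
    split_ifs <;> simp

theorem pvLeadA_eq_firstT (l : List (String × Bool)) :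
    pvLeadA l = match pvFirstT l with | none => (l.length : Int) | some k => (k : Int) := by
  induction l with
  | nil => simp [pvLeadA, pvFirstT]
  | cons p r ih =>
    simp only [pvLeadA, pvFirstT]
    by_cases hp : p.2 <;> simp [hp, ih]
    cases pvFirstT r <;> simp <;> ring

theorem pvLeadA_reverse_eq_lastT (l : List (String × Bool)) :
    pvLeadA l.reverse = match pvLastT l with | none => (l.length : Int) | some k => (l.length : Int) - 1 - (k : Int) := by
  induction l using List.reverseRecOn with
  | nil => simp [pvLeadA, pvLastT]
  | append_singleton r p ih =>
    rw [pvLastT_append_single, List.reverse_append]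
    simp only [List.reverse_singleton, List.singleton_append, pvLeadA]
    by_cases hp : p.2
    · simp [hp]
    · simp [hp, ih]
      cases pvLastT r with
      | none => simp; ring
      | some v => simp; ring

theorem pvFirstT_none_iff_lastT_none (l : List (String × Bool)) :
    pvFirstT l = none ↔ pvLastT l = none := by
  induction l with
  | nil => simp [pvFirstT, pvLastT]
  | cons p r ih =>
    simp only [pvFirstT, pvLastT]
    by_cases hp : p.2 <;> simp [hp]
    · cases hr : pvLastT r <;> simp
    · cases hf : pvFirstT r <;> cases hr : pvLastT r <;>
        simp_all

theorem pvFold_enum (l : List (String × Bool)) : ∀ (s : Int), 0 ≤ s → ∀ (a b : Int),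
    (PySem.List.enumerate l s).foldl pvStepB (a, b) =
      ((match pvFirstT l with | none => a | some k => if a < 0 then s + (k : Int) else a),
       (match pvLastT l with | none => b | some k => s + (k : Int))) := by
  induction l with
  | nil => intro s _ a b; simp [PySem.List.enumerate_nil, pvFirstT, pvLastT]
  | cons p r ih =>
    intro s hs a b
    rw [PySem.List.enumerate_cons, List.foldl_cons]
    by_cases hp : p.2
    · have hstep : pvStepB (a, b) (s, p) = ((if a < 0 then s else a), s) := by
        simp [pvStepB, hp]
      rw [hstep, ih (s + 1) (by omega) _ _]
      have ha' : ¬ ((if a < 0 then s else a) < 0) := by split_ifs <;> omega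
      simp only [pvFirstT, pvLastT, hp, if_pos, Prod.mk.injEq]
      refine ⟨?_, ?_⟩
      · cases pvFirstT r <;> simp [ha']
      · cases pvLastT r with
        | none => simp
        | some v => push_cast; ring
    · have hstep : pvStepB (a, b) (s, p) = (a, b) := by simp [pvStepB, hp]
      rw [hstep, ih (s + 1) (by omega) _ _]
      simp only [pvFirstT, pvLastT, hp, Prod.mk.injEq]
      refine ⟨?_, ?_⟩
      · cases pvFirstT r with
        | none => rfl
        | some v =>
          simp only [Option.map_some]
          by_cases h : a < 0
          · simp [h]; ring
          · simp [h]
      · cases pvLastT r with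
        | none => rfl
        | some v => simp only []; push_cast; ring

-- ===== VERDICT (by name: the statement is the Claim_ definition above) =====
theorem leading_trailing_context_mask_py_spec : Claim_equal_leading_trailing_context_mask_py := by
  intro l _
  unfold Spec_leading_trailing_context_mask_py
  unfold leading_trailing_context_mask_py leading_trailing_context_mask_py_alt
  rw [pvFold_enum l 0 le_rfl (-1) (-1), pvLeadA_eq_firstT, pvLeadA_reverse_eq_lastT]
  cases hf : pvFirstT l with
  | none =>
    have hl : pvLastT l = none := (pvFirstT_none_iff_lastT_none l).mp hf
    simp [hl]
  | some k =>
    cases hlt : pvLastT l with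
    | none =>
      have h := (pvFirstT_none_iff_lastT_none l).mpr hlt
      rw [hf] at h; cases h
    | some m =>
      have hk : ¬ ((k : Int) < 0) := not_lt.mpr (Int.natCast_nonneg k)
      simp [hk]
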